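-- pv_equiv track=rewrite | github.com/salman65/coding-shenanigans | careem_test_sol.py | getMinimumUniqueSum
-- ===== SOURCE A (Python) =====
-- def getMinimumUniqueSum(arr):
--     res = list(arr)
--     for i in range(len(arr)):
--         elem = arr[i]
--         new_arr = list(res)
--         new_arr.remove(elem)
--         while elem in new_arr:
--             elem += 1
--         res[i] = elem
--     return sum(res)
-- ===== SOURCE B (Python) =====
-- def getMinimumUniqueSum(arr):
--     total = 0
--     prev = None
--     for a in sorted(arr):
--         if prev is not None and a <= prev:
--             a = prev + 1
--         total += a
--         prev = a
--     return total
-- ===== Notes on version B (the rewrite author's own statement) =====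
-- stated objective: faster
-- what changed: Replaced the per-element rescan of the whole current list with remove/linear-bump by a single sort ascending followed by one greedy pass (v = max(a, prev+1)) accumulating the sum.
import Mathlib
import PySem

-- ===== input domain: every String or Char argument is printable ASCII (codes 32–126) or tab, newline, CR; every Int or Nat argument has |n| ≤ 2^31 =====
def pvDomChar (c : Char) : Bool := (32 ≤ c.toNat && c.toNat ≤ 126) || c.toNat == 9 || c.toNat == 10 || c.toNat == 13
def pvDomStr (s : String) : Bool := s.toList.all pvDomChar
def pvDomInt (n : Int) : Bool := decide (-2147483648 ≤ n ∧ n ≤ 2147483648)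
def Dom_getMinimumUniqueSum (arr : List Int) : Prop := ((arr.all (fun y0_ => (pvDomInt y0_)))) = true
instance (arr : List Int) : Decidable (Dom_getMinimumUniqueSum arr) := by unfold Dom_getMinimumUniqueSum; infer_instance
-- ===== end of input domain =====

-- B replaces A's per-element rescan-and-bump over the whole current list by sort-ascending plus one
-- greedy pass (v = max(a, prev+1)); objective: faster (measured on a timing run's inputs).

-- ===== PORT A =====

-- helper for A's termination: bumping past a member strictly shrinks the set of members ≥ elem
theorem pvBump_measure (na : List Int) (elem : Int) (h : elem ∈ na) :
    (na.filter (fun x => decide (elem + 1 ≤ x))).length <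
      (na.filter (fun x => decide (elem ≤ x))).length := by
  have hsub : na.filter (fun x => decide (elem + 1 ≤ x)) =
      (na.filter (fun x => decide (elem ≤ x))).filter (fun x => decide (elem + 1 ≤ x)) := by
    rw [List.filter_filter]
    congr 1
    funext x
    by_cases h1 : elem + 1 ≤ x
    · have h2 : elem ≤ x := by omega
      simp [h1, h2]
    · simp [h1]
  rw [hsub]
  apply List.length_filter_lt_length_iff_exists.mpr
  exact ⟨elem, by simp [List.mem_filter, h], by simp⟩

-- A's inner `while elem in new_arr: elem += 1`
def bumpA (na : List Int) (elem : Int) : Int :=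
  if elem ∈ na then bumpA na (elem + 1) else elem
termination_by (na.filter (fun x => decide (elem ≤ x))).length
decreasing_by exact pvBump_measure na elem (by assumption)

-- A's `for i in range(len(arr))` loop, one recursive call per index
def loopA (arr : List Int) : List Nat → List Int → List Int
  | [], res => res
  | i :: is, res =>
      let elem := arr.getD i 0                                   -- arr[i]; i < len(arr) always holds, exact
      let new_arr := (PySem.List.remove? res elem).getD []       -- new_arr.remove(elem); elem ∈ res always (res[i] = arr[i]), exact
      loopA arr is (res.set i (bumpA new_arr elem))              -- res[i] = elem after the while loop

def getMinimumUniqueSum (arr : List Int) : Int :=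
  (loopA arr (List.range arr.length) arr).sum

-- ===== PORT B =====
def getMinimumUniqueSum_alt (arr : List Int) : Int :=
  ((PySem.List.sorted arr (fun x => x) false).foldl
    (fun (st : Int × Option Int) a =>
      let v := match st.2 with
        | some p => if a ≤ p then p + 1 else a
        | none => a
      (st.1 + v, some v)) (0, none)).1

-- ===== PRECONDITION & SPEC =====
def Spec_getMinimumUniqueSum (arr : List Int) (out : Int) : Prop := out = getMinimumUniqueSum_alt arr
instance (arr : List Int) (out : Int) : Decidable (Spec_getMinimumUniqueSum arr out) := by unfold Spec_getMinimumUniqueSum; infer_instance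

-- ===== CLAIM (what is proved, stated in full; the proofs are below) =====
def Claim_equal_getMinimumUniqueSum : Prop := ∀ (arr : List Int), Dom_getMinimumUniqueSum arr → Spec_getMinimumUniqueSum arr (getMinimumUniqueSum arr)

-- ===== LEMMAS AND PROOFS =====

-- greedy sum with previous assigned value p
def gsum : Int → List Int → Int
  | _, [] => 0
  | p, a :: s => (max a (p + 1)) + gsum (max a (p + 1)) s

-- greedy sum of a whole (sorted) list
def gfull : List Int → Int
  | [] => 0
  | a :: s => a + gsum a s

-- the common normal form: greedy sum of the sorted list
def Nval (l : List Int) : Int := gfull (PySem.List.sorted l (fun x => x) false)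

theorem Nval_perm {l l' : List Int} (h : l.Perm l') : Nval l = Nval l' := by
  unfold Nval
  rw [PySem.List.sorted_eq_sorted_of_perm l l' (fun x => x) (fun a b h => h) h]

-- B's fold computes gfull of the sorted list
theorem foldB_gsum (s : List Int) : ∀ (t p : Int),
    (s.foldl (fun (st : Int × Option Int) a =>
      let v := match st.2 with
        | some q => if a ≤ q then q + 1 else a
        | none => a
      (st.1 + v, some v)) (t, some p)).1 = t + gsum p s := by
  induction s with
  | nil => intro t p; simp [gsum]
  | cons a s ih =>
      intro t p
      simp only [List.foldl_cons, gsum]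
      rw [ih]
      by_cases h : a ≤ p
      · have hm : max a (p + 1) = p + 1 := by omega
        simp [h, hm, add_assoc]
      · have hm : max a (p + 1) = a := by omega
        simp [h, hm, add_assoc]

theorem alt_eq_Nval (arr : List Int) : getMinimumUniqueSum_alt arr = Nval arr := by
  unfold getMinimumUniqueSum_alt Nval
  cases h : PySem.List.sorted arr (fun x => x) false with
  | nil => simp [gfull]
  | cons a s =>
      simp only [List.foldl_cons, gfull]
      rw [foldB_gsum, zero_add]

-- the run lemma: with previous value v ≥ e, consuming e::e^k++y or e^k++(e+1)::y gives the same sum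
theorem grun (e : Int) (y : List Int) : ∀ (k : Nat) (v : Int), e ≤ v →
    gsum v (e :: (List.replicate k e ++ y)) = gsum v (List.replicate k e ++ (e + 1) :: y) := by
  intro k
  induction k with
  | zero =>
      intro v hv
      simp only [List.replicate, List.nil_append, gsum]
      have h1 : max e (v + 1) = v + 1 := by omega
      have h2 : max (e + 1) (v + 1) = v + 1 := by omega
      rw [h1, h2]
  | succ k ih =>
      intro v hv
      have hrep : List.replicate (k + 1) e = e :: List.replicate k e := rfl
      rw [hrep]
      simp only [List.cons_append, gsum]
      have h1 : max e (v + 1) = v + 1 := by omega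
      rw [h1]
      have hih := ih (v + 1) (by omega)
      simp only [gsum] at hih ⊢
      rw [hih]

-- congruence through a common sorted prefix ending at e
theorem gsum_congr_suffix (e : Int) (w1 w2 : List Int)
    (H : ∀ v : Int, e ≤ v → gsum v w1 = gsum v w2) :
    ∀ (u : List Int) (p : Int), gsum p (u ++ e :: w1) = gsum p (u ++ e :: w2) := by
  intro u
  induction u with
  | nil =>
      intro p
      simp only [List.nil_append, gsum]
      rw [H (max e (p + 1)) (by omega)]
  | cons a u ih =>
      intro p
      simp only [List.cons_append, gsum]
      rw [ih]

theorem gfull_congr_suffix (e : Int) (w1 w2 : List Int) (u : List Int)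
    (H : ∀ v : Int, e ≤ v → gsum v w1 = gsum v w2) :
    gfull (u ++ e :: w1) = gfull (u ++ e :: w2) := by
  cases u with
  | nil =>
      simp only [List.nil_append, gfull]
      rw [H e (le_refl e)]
  | cons a u =>
      simp only [List.cons_append, gfull]
      rw [gsum_congr_suffix e w1 w2 H]

-- split a sorted list all ≥ e into the leading run of e's and a strictly greater suffix
theorem split_run (e : Int) : ∀ (w : List Int), w.Pairwise (· ≤ ·) → (∀ b ∈ w, e ≤ b) →
    ∃ (k : Nat) (y : List Int), w = List.replicate k e ++ y ∧ (∀ b ∈ y, e < b) ∧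
      y.Pairwise (· ≤ ·) := by
  intro w
  induction w with
  | nil => intro _ _; exact ⟨0, [], rfl, by simp, by simp⟩
  | cons a w ih =>
      intro hp hb
      rcases List.pairwise_cons.mp hp with ⟨ha, hpw⟩
      by_cases hae : a = e
      · obtain ⟨k, y, hw, hy, hyp⟩ := ih hpw (fun b hbw => hb b (List.mem_cons_of_mem a hbw))
        exact ⟨k + 1, y, by rw [List.replicate_succ, List.cons_append, hw, hae], hy, hyp⟩
      · have hea : e < a := lt_of_le_of_ne (hb a (List.mem_cons_self)) (fun h => hae h.symm)
        refine ⟨0, a :: w, by simp, ?_, hp⟩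
        intro b hbw
        rcases List.mem_cons.mp hbw with h | h
        · omega
        · exact lt_of_lt_of_le hea (ha b h)

-- split a sorted list at a member e into prefix ≤ e, the run of e's, and a strictly greater suffix
theorem sorted_split (e : Int) (s : List Int) (hp : s.Pairwise (· ≤ ·)) (he : e ∈ s) :
    ∃ (u : List Int) (k : Nat) (y : List Int),
      s = u ++ e :: (List.replicate k e ++ y) ∧ (∀ b ∈ u, b ≤ e) ∧ (∀ b ∈ y, e < b) ∧
      u.Pairwise (· ≤ ·) ∧ y.Pairwise (· ≤ ·) := by
  obtain ⟨u, w, hs⟩ := List.append_of_mem he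
  subst hs
  rw [List.pairwise_append] at hp
  rcases hp with ⟨hu, hew, hue⟩
  rcases List.pairwise_cons.mp hew with ⟨hew', hw⟩
  obtain ⟨k, y, hwk, hy, hyp⟩ := split_run e w hw hew'
  exact ⟨u, k, y, by rw [hwk], fun b hb => hue b hb e List.mem_cons_self, hy, hu, hyp⟩

-- key lemma: replacing one duplicated copy of e by e+1 preserves Nval
theorem Nval_bump_step (e : Int) (T : List Int) (he : e ∈ T) :
    Nval (e :: T) = Nval ((e + 1) :: T) := by
  have hperm : (PySem.List.sorted T (fun x => x) false).Perm T :=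
    PySem.List.sorted_perm T (fun x => x) false
  have hpair : (PySem.List.sorted T (fun x => x) false).Pairwise (· ≤ ·) :=
    PySem.List.sorted_pairwise T (fun x => x)
  have hes : e ∈ PySem.List.sorted T (fun x => x) false := hperm.mem_iff.mpr he
  obtain ⟨u, k, y, hsplit, hu, hy, hup, hyp⟩ :=
    sorted_split e (PySem.List.sorted T (fun x => x) false) hpair hes
  have hrep_mem : ∀ b ∈ List.replicate k e, b = e := fun b hb => List.eq_of_mem_replicate hb
  -- the two sorted arrangements
  have hA : PySem.List.sorted (e :: T) (fun x => x) false =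
      u ++ e :: (e :: (List.replicate k e ++ y)) := by
    apply PySem.List.sorted_id_eq_of_perm_of_pairwise
    · have h1 : (u ++ e :: (e :: (List.replicate k e ++ y))).Perm
          (e :: (PySem.List.sorted T (fun x => x) false)) := by
        rw [hsplit]
        exact List.perm_middle
      exact h1.trans (hperm.cons e)
    · rw [List.pairwise_append]
      refine ⟨hup, ?_, ?_⟩
      · rw [List.pairwise_cons]
        refine ⟨?_, ?_⟩
        · intro b hb
          rcases List.mem_cons.mp hb with h | h
          · omega
          · rcases List.mem_append.mp h with h | h
            · have := hrep_mem b h; omega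
            · have := hy b h; omega
        · rw [List.pairwise_cons]
          refine ⟨?_, ?_⟩
          · intro b hb
            rcases List.mem_append.mp hb with h | h
            · have := hrep_mem b h; omega
            · have := hy b h; omega
          · have hps := hpair
            rw [hsplit, List.pairwise_append, List.pairwise_cons] at hps
            exact hps.2.1.2
      · intro a ha b hb
        have hae := hu a ha
        rcases List.mem_cons.mp hb with h | h
        · omega
        · rcases List.mem_cons.mp h with h' | h'
          · omega
          · rcases List.mem_append.mp h' with h'' | h''
            · have := hrep_mem b h''; omega
            · have := hy b h''; omega
  have hB : PySem.List.sorted ((e + 1) :: T) (fun x => x) false =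
      u ++ e :: (List.replicate k e ++ (e + 1) :: y) := by
    apply PySem.List.sorted_id_eq_of_perm_of_pairwise
    · have h0 : u ++ e :: (List.replicate k e ++ (e + 1) :: y) =
          (u ++ e :: List.replicate k e) ++ (e + 1) :: y := by simp
      have h0' : (u ++ e :: List.replicate k e) ++ y =
          u ++ e :: (List.replicate k e ++ y) := by simp
      have h1 : ((u ++ e :: List.replicate k e) ++ (e + 1) :: y).Perm
          ((e + 1) :: (PySem.List.sorted T (fun x => x) false)) := by
        rw [hsplit, ← h0']
        exact List.perm_middle
      rw [h0]
      exact h1.trans (hperm.cons (e + 1))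
    · rw [List.pairwise_append]
      refine ⟨hup, ?_, ?_⟩
      · rw [List.pairwise_cons]
        refine ⟨?_, ?_⟩
        · intro b hb
          rcases List.mem_append.mp hb with h | h
          · have := hrep_mem b h; omega
          · rcases List.mem_cons.mp h with h' | h'
            · omega
            · have := hy b h'; omega
        · rw [List.pairwise_append]
          refine ⟨List.pairwise_replicate.mpr (Or.inr le_rfl), ?_, ?_⟩
          · rw [List.pairwise_cons]
            exact ⟨fun b hb => by have := hy b hb; omega, hyp⟩
          · intro a ha b hb
            have := hrep_mem a ha
            rcases List.mem_cons.mp hb with h | h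
            · omega
            · have := hy b h; omega
      · intro a ha b hb
        have hae := hu a ha
        rcases List.mem_cons.mp hb with h | h
        · omega
        · rcases List.mem_append.mp h with h' | h'
          · have := hrep_mem b h'; omega
          · rcases List.mem_cons.mp h' with h'' | h''
            · omega
            · have := hy b h''; omega
  unfold Nval
  rw [hA, hB]
  exact gfull_congr_suffix e _ _ u (fun v hv => grun e y k v hv)

-- bumping preserves Nval, and the result is not a member
theorem bumpA_spec (na : List Int) (elem : Int) :
    Nval (bumpA na elem :: na) = Nval (elem :: na) ∧ bumpA na elem ∉ na := by
  induction elem using bumpA.induct na with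
  | case1 elem hmem ih =>
      rw [bumpA, if_pos hmem]
      exact ⟨ih.1.trans (Nval_bump_step elem na hmem).symm, ih.2⟩
  | case2 elem hmem =>
      rw [bumpA, if_neg hmem]
      exact ⟨rfl, hmem⟩

-- greedy on a strictly increasing list starting above p is the plain sum
theorem gsum_of_lt : ∀ (s : List Int) (p : Int), (p :: s).Pairwise (· < ·) → gsum p s = s.sum := by
  intro s
  induction s with
  | nil => intro p _; simp [gsum]
  | cons a s ih =>
      intro p hp
      rcases List.pairwise_cons.mp hp with ⟨hpa, has⟩
      have hpa' : p < a := hpa a List.mem_cons_self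
      simp only [gsum, List.sum_cons]
      have hm : max a (p + 1) = a := by omega
      rw [hm, ih a has]

theorem Nval_of_pairwise_ne (l : List Int) (h : l.Pairwise (· ≠ ·)) : Nval l = l.sum := by
  unfold Nval
  have hperm : (PySem.List.sorted l (fun x => x) false).Perm l :=
    PySem.List.sorted_perm l (fun x => x) false
  have hpair : (PySem.List.sorted l (fun x => x) false).Pairwise (· ≤ ·) :=
    PySem.List.sorted_pairwise l (fun x => x)
  have hne : (PySem.List.sorted l (fun x => x) false).Pairwise (· ≠ ·) :=
    (hperm.pairwise_iff (fun h => Ne.symm h)).mpr h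
  have hlt : (PySem.List.sorted l (fun x => x) false).Pairwise (· < ·) :=
    (hpair.and hne).imp (fun h => lt_of_le_of_ne h.1 h.2)
  rw [← hperm.sum_eq]
  cases hs : PySem.List.sorted l (fun x => x) false with
  | nil => simp [gfull]
  | cons a s =>
      rw [hs] at hlt
      simp only [gfull, List.sum_cons]
      rw [gsum_of_lt s a hlt]

-- one step of A's loop: the multiset invariant and the freshness of the new entry
theorem loopA_inv (arr : List Int) : ∀ (k i : Nat) (res : List Int),
    res.length = arr.length →
    i + k = arr.length →
    (∀ p, i ≤ p → res.getD p 0 = arr.getD p 0) →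
    (∀ p q, p < i → q < arr.length → p ≠ q → res.getD p 0 ≠ res.getD q 0) →
    (loopA arr (List.range' i k) res).length = arr.length ∧
    Nval (loopA arr (List.range' i k) res) = Nval res ∧
    (∀ p q, p < arr.length → q < arr.length → p ≠ q →
      (loopA arr (List.range' i k) res).getD p 0 ≠ (loopA arr (List.range' i k) res).getD q 0) := by
  intro k
  induction k with
  | zero =>
      intro i res hlen hik hres hD
      rw [List.range'_zero]
      exact ⟨hlen, rfl, fun p q hp hq hpq => hD p q (by omega) hq hpq⟩
  | succ k ih =>
      intro i res hlen hik hres hD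
      have hi : i < arr.length := by omega
      have hires : i < res.length := by omega
      rw [List.range'_succ]
      simp only [loopA]
      -- elem = arr[i] = res[i]
      have helem : arr.getD i 0 = res.getD i 0 := (hres i le_rfl).symm
      have helem' : res.getD i 0 = res[i] := List.getD_eq_getElem res 0 hires
      have hmem : arr.getD i 0 ∈ res := by
        rw [helem, helem']
        exact List.getElem_mem hires
      rw [PySem.List.remove?_eq_some_erase res (arr.getD i 0) hmem]
      simp only [Option.getD_some]
      set elem := arr.getD i 0 with helemdef
      set bump := bumpA (res.erase elem) elem with hbumpdef
      -- permutation bookkeeping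
      have perm1 : res.Perm (elem :: res.eraseIdx i) := by
        conv_lhs => rw [← List.take_append_drop i res, ← List.getElem_cons_drop hires]
        rw [List.eraseIdx_eq_take_drop_succ, ← helem', ← helem]
        exact List.perm_middle
      have perm2 : (res.erase elem).Perm (res.eraseIdx i) :=
        List.Perm.cons_inv ((List.perm_cons_erase hmem).symm.trans perm1)
      have perm3 : (res.set i bump).Perm (bump :: res.eraseIdx i) := by
        rw [List.set_eq_take_append_cons_drop, if_pos hires, List.eraseIdx_eq_take_drop_succ]
        exact List.perm_middle
      obtain ⟨hbN, hbmem⟩ := bumpA_spec (res.erase elem) elem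
      -- Nval preserved by this step
      have hstep : Nval (res.set i bump) = Nval res := by
        calc Nval (res.set i bump) = Nval (bump :: res.eraseIdx i) := Nval_perm perm3
          _ = Nval (bump :: res.erase elem) := Nval_perm (perm2.symm.cons bump)
          _ = Nval (elem :: res.erase elem) := hbN
          _ = Nval res := Nval_perm (List.perm_cons_erase hmem).symm
      -- the fresh value differs from every other current entry
      have hfresh : ∀ q, q < arr.length → q ≠ i → bump ≠ res.getD q 0 := by
        intro q hq hqi
        have hqres : q < res.length := by omega
        have hq' : res.getD q 0 = res[q] := List.getD_eq_getElem res 0 hqres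
        have hmemE : res[q] ∈ res.eraseIdx i := by
          by_cases hqi' : q < i
          · have hlenE : q < (res.eraseIdx i).length := by
              rw [List.length_eraseIdx_of_lt hires]; omega
            have : (res.eraseIdx i)[q] = res[q] := by
              rw [List.getElem_eraseIdx]; simp [hqi']
            rw [← this]; exact List.getElem_mem hlenE
          · have hqi'' : i < q := by omega
            have hlenE : q - 1 < (res.eraseIdx i).length := by
              rw [List.length_eraseIdx_of_lt hires]; omega
            have : (res.eraseIdx i)[q - 1] = res[q] := by
              rw [List.getElem_eraseIdx]
              have : ¬ (q - 1 < i) := by omega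
              simp only [this, dif_neg, not_false_iff]
              congr 1; omega
            rw [← this]; exact List.getElem_mem hlenE
        have hbE : bump ∉ res.eraseIdx i := fun hc => hbmem (perm2.mem_iff.mpr hc)
        intro hc
        exact hbE (by rw [hc, hq']; exact hmemE)
      -- invariants for the recursive call
      have hlen' : (res.set i bump).length = arr.length := by rw [List.length_set]; exact hlen
      have hres' : ∀ p, i + 1 ≤ p → (res.set i bump).getD p 0 = arr.getD p 0 := by
        intro p hp
        by_cases hpl : p < arr.length
        · have hpr : p < (res.set i bump).length := by omega
          rw [List.getD_eq_getElem _ 0 hpr, List.getElem_set, if_neg (by omega)]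
          rw [← List.getD_eq_getElem res 0 (by omega : p < res.length)]
          exact hres p (by omega)
        · rw [List.getD_eq_default _ 0 (by rw [hlen']; omega),
              List.getD_eq_default _ 0 (by omega)]
      have hD' : ∀ p q, p < i + 1 → q < arr.length → p ≠ q →
          (res.set i bump).getD p 0 ≠ (res.set i bump).getD q 0 := by
        intro p q hp hq hpq
        have hpr : p < (res.set i bump).length := by omega
        have hqr : q < (res.set i bump).length := by omega
        rw [List.getD_eq_getElem _ 0 hpr, List.getD_eq_getElem _ 0 hqr,
            List.getElem_set, List.getElem_set]
        by_cases hpi : i = p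
        · rw [if_pos hpi, if_neg (by omega)]
          have := hfresh q hq (by omega)
          rw [List.getD_eq_getElem res 0 (by omega : q < res.length)] at this
          exact this
        · rw [if_neg hpi]
          by_cases hqi : i = q
          · rw [if_pos hqi]
            have := hfresh p (by omega) (by omega)
            rw [List.getD_eq_getElem res 0 (by omega : p < res.length)] at this
            exact fun hc => this hc.symm
          · rw [if_neg hqi]
            have := hD p q (by omega) hq hpq
            rw [List.getD_eq_getElem res 0 (by omega : p < res.length),
                List.getD_eq_getElem res 0 (by omega : q < res.length)] at this
            exact this
      obtain ⟨h1, h2, h3⟩ := ih (i + 1) (res.set i bump) hlen' (by omega) hres' hD'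
      exact ⟨h1, h2.trans hstep, h3⟩

-- ===== VERDICT (by name: the statement is the Claim_ definition above) =====
theorem getMinimumUniqueSum_spec : Claim_equal_getMinimumUniqueSum := by
  intro arr _
  unfold Spec_getMinimumUniqueSum getMinimumUniqueSum
  rw [List.range_eq_range']
  obtain ⟨hlen, hN, hD⟩ := loopA_inv arr arr.length 0 arr rfl (by omega)
    (fun p _ => rfl) (fun p q hp _ _ => absurd hp (by omega))
  set out := loopA arr (List.range' 0 arr.length) arr with hout
  have hnd : out.Pairwise (· ≠ ·) := by
    rw [List.pairwise_iff_getElem]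
    intro p q hp hq hpq
    have := hD p q (by omega) (by omega) (by omega)
    rw [List.getD_eq_getElem out 0 hp, List.getD_eq_getElem out 0 hq] at this
    exact this
  rw [alt_eq_Nval, ← hN, ← Nval_of_pairwise_ne out hnd]
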